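-- pv_equiv track=rewrite | github.com/DevOpsOfChaos/media-manager | src/media_manager/core/gui_qt_runtime_smoke_widget_tree.py | _safe_id
-- ===== SOURCE A (Python) =====
-- def _safe_id(value: object, fallback: str = "node") -> str:
--     text = str(value or fallback).strip().lower().replace("_", "-").replace(" ", "-")
--     chars: list[str] = []
--     last_dash = False
--     for char in text:
--         if char.isalnum():
--             chars.append(char)
--             last_dash = False
--         elif not last_dash:
--             chars.append("-")
--             last_dash = True
--     return "".join(chars).strip("-") or fallback
-- ===== SOURCE B (Python) =====
-- def _safe_id(value: object, fallback: str = "node") -> str: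
--     text = str(value or fallback).strip().lower()
--     parts = []
--     i, n = 0, len(text)
--     while i < n:
--         key = text[i].isalnum()
--         j = i
--         while j < n and text[j].isalnum() == key:
--             j += 1
--         parts.append(text[i:j] if key else "-")
--         i = j
--     return "".join(parts).strip("-") or fallback
-- ===== Notes on version B (the rewrite author's own statement) =====
-- stated objective: alternative
-- what changed: Replaces A's two pre-substitution replace passes plus per-character dash-flag loop with a single two-pointer scan over maximal alphanumeric/non-alphanumeric runs, emitting each alphanumeric run whole and one dash per other run.
import Mathlib
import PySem

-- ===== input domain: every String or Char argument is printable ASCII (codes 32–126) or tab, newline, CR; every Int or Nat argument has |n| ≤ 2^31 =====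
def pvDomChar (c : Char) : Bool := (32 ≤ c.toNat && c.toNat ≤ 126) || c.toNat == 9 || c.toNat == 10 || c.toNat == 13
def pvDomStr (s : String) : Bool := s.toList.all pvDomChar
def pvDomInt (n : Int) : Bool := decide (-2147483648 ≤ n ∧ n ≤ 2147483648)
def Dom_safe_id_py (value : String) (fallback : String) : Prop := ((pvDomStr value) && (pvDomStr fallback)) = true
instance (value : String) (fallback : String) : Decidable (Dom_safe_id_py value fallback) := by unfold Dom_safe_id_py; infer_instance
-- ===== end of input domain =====

-- B replaces A's replace-chain + per-character last_dash flag loop by a single scan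
-- over maximal alnum/non-alnum runs (alternative decomposition, same cost).

-- ===== PORT A =====
def safe_id_py (value : String) (fallback : String) : String :=
  let text := PySem.Chars.replace (PySem.Chars.replace
      (PySem.Chars.lower (PySem.Chars.strip (if value = "" then fallback else value).toList))
      ['_'] ['-']) [' '] ['-']
  let st := text.foldl (fun (st : List Char × Bool) char =>
      if PySem.Chars.isalnum char then (st.1 ++ [char], false)
      else if !st.2 then (st.1 ++ ['-'], true) else st) (([] : List Char), false)
  let r := PySem.Chars.stripChars st.1 ['-']
  if r.isEmpty then fallback else String.ofList r

-- ===== PORT B =====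
-- maximal runs of characters sharing the same isalnum key (the two-pointer scan of Source B)
def pvRuns (cs : List Char) : List (Bool × List Char) :=
  match cs with
  | [] => []
  | c :: rest =>
    let p := fun d => PySem.Chars.isalnum d == PySem.Chars.isalnum c
    (PySem.Chars.isalnum c, c :: rest.takeWhile p) :: pvRuns (rest.dropWhile p)
termination_by cs.length
decreasing_by
  simpa using Nat.lt_succ_of_le (List.length_dropWhile_le _ _)

def safe_id_py_alt (value : String) (fallback : String) : String :=
  let text := PySem.Chars.lower (PySem.Chars.strip (if value = "" then fallback else value).toList)
  let parts := (pvRuns text).map (fun g => if g.1 then g.2 else ['-'])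
  let r := PySem.Chars.stripChars parts.flatten ['-']
  if r.isEmpty then fallback else String.ofList r

-- ===== PRECONDITION & SPEC =====
def Spec_safe_id_py (value : String) (fallback : String) (out : String) : Prop := out = safe_id_py_alt value fallback
instance (value : String) (fallback : String) (out : String) : Decidable (Spec_safe_id_py value fallback out) := by unfold Spec_safe_id_py; infer_instance

-- ===== CLAIM (what is proved, stated in full; the proofs are below) =====
def Claim_equal_safe_id_py : Prop := ∀ (value : String) (fallback : String), Dom_safe_id_py value fallback → Spec_safe_id_py value fallback (safe_id_py value fallback)

-- ===== LEMMAS AND PROOFS =====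

-- what A's flag loop emits on the remaining input, given the current last_dash flag
def pvOut (cs : List Char) (ld : Bool) : List Char :=
  match cs with
  | [] => []
  | c :: cs =>
    if PySem.Chars.isalnum c then c :: pvOut cs false
    else if ld then pvOut cs true else '-' :: pvOut cs true

theorem pvFoldl_out (cs : List Char) (acc : List Char) (b : Bool) :
    (cs.foldl (fun (st : List Char × Bool) char =>
      if PySem.Chars.isalnum char then (st.1 ++ [char], false)
      else if !st.2 then (st.1 ++ ['-'], true) else st) (acc, b)).1 = acc ++ pvOut cs b := by
  induction cs generalizing acc b with
  | nil => simp [pvOut]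
  | cons c cs ih =>
    simp only [List.foldl_cons]
    by_cases h : PySem.Chars.isalnum c = true
    · have := ih (acc ++ [c]) false
      simpa [h, pvOut] using this
    · cases b
      · have := ih (acc ++ ['-']) true
        simpa [h, pvOut] using this
      · have := ih acc true
        simpa [h, pvOut] using this

theorem pvOut_map (g : Char → Char)
    (h1 : ∀ c, PySem.Chars.isalnum (g c) = PySem.Chars.isalnum c)
    (h2 : ∀ c, PySem.Chars.isalnum c = true → g c = c) :
    ∀ (cs : List Char) (b : Bool), pvOut (cs.map g) b = pvOut cs b := by
  intro cs
  induction cs with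
  | nil => intro b; rfl
  | cons c cs ih =>
    intro b
    simp only [List.map_cons, pvOut, h1 c]
    by_cases h : PySem.Chars.isalnum c = true
    · simp [h, h2 c h, ih]
    · cases b <;> simp [h, ih]

theorem pvReplace_go_single (a b : Char) :
    ∀ (fuel : Nat) (l acc : List Char), l.length ≤ fuel →
      PySem.Chars.replace.go [a] [b] fuel l acc
        = acc.reverse ++ l.map (fun c => if c = a then b else c) := by
  intro fuel
  induction fuel with
  | zero =>
    intro l acc h
    have : l = [] := List.eq_nil_of_length_eq_zero (Nat.le_zero.mp h)
    subst this; simp [PySem.Chars.replace.go]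
  | succ n ih =>
    intro l acc h
    cases l with
    | nil => simp [PySem.Chars.replace.go]
    | cons c t =>
      rw [PySem.Chars.replace.go]
      by_cases hc : c = a
      · subst hc
        have hp : [c].isPrefixOf (c :: t) = true := by simp [List.isPrefixOf]
        simp only [hp]
        rw [ih _ _ (by simpa using Nat.le_of_succ_le_succ h)]
        simp
      · have hp : [a].isPrefixOf (c :: t) = false := by
          simp [List.isPrefixOf]; exact fun hh => absurd hh.symm hc
        simp only [hp, Bool.false_eq_true, if_false]
        rw [ih _ _ (by simpa using Nat.le_of_succ_le_succ h)]
        simp [hc]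

theorem pvReplace_single (a b : Char) (s : List Char) :
    PySem.Chars.replace s [a] [b] = s.map (fun c => if c = a then b else c) := by
  rw [PySem.Chars.replace]
  simp only [List.isEmpty_cons, Bool.false_eq_true, if_false]
  exact pvReplace_go_single a b s.length s [] (le_refl _)

theorem pvOut_alnum_prefix (run cs : List Char)
    (h : ∀ d ∈ run, PySem.Chars.isalnum d = true) :
    pvOut (run ++ cs) false = run ++ pvOut cs false := by
  induction run with
  | nil => rfl
  | cons d run ih =>
    simp only [List.cons_append, pvOut, h d (by simp)]
    simp [ih (fun e he => h e (by simp [he]))]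

theorem pvOut_nonalnum_skip (run cs : List Char)
    (h : ∀ d ∈ run, PySem.Chars.isalnum d = false) :
    pvOut (run ++ cs) true = pvOut cs true := by
  induction run with
  | nil => rfl
  | cons d run ih =>
    simp only [List.cons_append, pvOut, h d (by simp)]
    simp [ih (fun e he => h e (by simp [he]))]

theorem pvOut_true_eq_false (cs : List Char)
    (h : cs = [] ∨ ∃ d t, cs = d :: t ∧ PySem.Chars.isalnum d = true) :
    pvOut cs true = pvOut cs false := by
  rcases h with h | ⟨d, t, rfl, hd⟩
  · subst h; rfl
  · simp [pvOut, hd]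

theorem pvOut_eq_runs (cs : List Char) :
    pvOut cs false = ((pvRuns cs).map (fun g => if g.1 then g.2 else ['-'])).flatten := by
  induction cs using pvRuns.induct with
  | case1 => simp [pvRuns, pvOut]
  | case2 c rest p ih =>
    have hsplit : rest = rest.takeWhile p ++ rest.dropWhile p := (List.takeWhile_append_dropWhile).symm
    have hrun : ∀ d ∈ rest.takeWhile p, PySem.Chars.isalnum d = PySem.Chars.isalnum c := by
      intro d hd
      have := List.mem_takeWhile_imp hd
      simpa [p] using this
    rw [pvRuns]
    simp only [List.map_cons, List.flatten_cons]
    by_cases hc : PySem.Chars.isalnum c = true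
    · have hq : (fun d => PySem.Chars.isalnum d) = p := by
        funext d; simp [p, hc]
      have h1 : pvOut (c :: rest) false = c :: rest.takeWhile p ++ pvOut (rest.dropWhile p) false := by
        conv_lhs => rw [hsplit]
        rw [show (c :: (rest.takeWhile p ++ rest.dropWhile p)) =
              ((c :: rest.takeWhile p) ++ rest.dropWhile p) by simp]
        rw [pvOut_alnum_prefix _ _ (by
          intro d hd
          rcases List.mem_cons.mp hd with rfl | hd
          · exact hc
          · rw [hrun d hd]; exact hc)]
      rw [h1, ih]
      simp [hc]
      rw [hq]
    · have hc' : PySem.Chars.isalnum c = false := by simpa using hc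
      have hq : (fun d => !PySem.Chars.isalnum d) = p := by
        funext d; simp [p, hc']
      have h1 : pvOut (c :: rest) false = '-' :: pvOut (rest.dropWhile p) true := by
        conv_lhs => rw [hsplit]
        rw [show (c :: (rest.takeWhile p ++ rest.dropWhile p)) =
              (c :: rest.takeWhile p) ++ rest.dropWhile p by simp]
        have h2 : pvOut ((c :: rest.takeWhile p) ++ rest.dropWhile p) false
            = '-' :: pvOut (rest.takeWhile p ++ rest.dropWhile p) true := by
          simp [pvOut, hc']
        rw [h2, pvOut_nonalnum_skip _ _ (fun d hd => by rw [hrun d hd]; exact hc')]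
      have h3 : pvOut (rest.dropWhile p) true = pvOut (rest.dropWhile p) false := by
        apply pvOut_true_eq_false
        cases hdw : rest.dropWhile p with
        | nil => exact Or.inl rfl
        | cons d t =>
          refine Or.inr ⟨d, t, rfl, ?_⟩
          have := List.head?_dropWhile_not p rest
          rw [hdw] at this
          have hne : ¬ (PySem.Chars.isalnum d == PySem.Chars.isalnum c) = true := by
            simpa [p] using this
          cases hda : PySem.Chars.isalnum d
          · exact absurd (by simp [hda, hc']) hne
          · rfl
      rw [h1, h3, ih]
      simp [hc']
      rw [hq]

-- ===== VERDICT (by name: the statement is the Claim_ definition above) =====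
theorem safe_id_py_spec : Claim_equal_safe_id_py := by
  intro value fallback _
  unfold Spec_safe_id_py safe_id_py safe_id_py_alt
  have hrep : ∀ (s : List Char),
      PySem.Chars.replace (PySem.Chars.replace s ['_'] ['-']) [' '] ['-']
        = (s.map (fun c => if c = '_' then '-' else c)).map (fun c => if c = ' ' then '-' else c) := by
    intro s; rw [pvReplace_single, pvReplace_single]
  set t := PySem.Chars.lower (PySem.Chars.strip (if value = "" then fallback else value).toList) with ht
  have key : (List.foldl (fun (st : List Char × Bool) char =>
      if PySem.Chars.isalnum char then (st.1 ++ [char], false)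
      else if !st.2 then (st.1 ++ ['-'], true) else st) (([] : List Char), false)
      (PySem.Chars.replace (PySem.Chars.replace t ['_'] ['-']) [' '] ['-'])).1
      = ((pvRuns t).map (fun g => if g.1 then g.2 else ['-'])).flatten := by
    rw [hrep, pvFoldl_out, List.nil_append]
    rw [pvOut_map (fun c => if c = ' ' then '-' else c)
        (by intro c; by_cases h : c = ' ' <;> simp [h] <;> decide)
        (by intro c hc; by_cases h : c = ' ' <;> simp [h]; subst h; revert hc; decide)]
    rw [pvOut_map (fun c => if c = '_' then '-' else c)
        (by intro c; by_cases h : c = '_' <;> simp [h] <;> decide)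
        (by intro c hc; by_cases h : c = '_' <;> simp [h]; subst h; revert hc; decide)]
    exact pvOut_eq_runs t
  simp only [key]
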